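-- pv_equiv track=rewrite | github.com/Mason049/Pi-Alternative-Splicing-Project | extract_gene_sequences.py | match_contig
-- ===== SOURCE A (Python) =====
-- from typing import Dict, List, Optional, Tuple
--
-- def sanitize_contig_name(name: str) -> Tuple[str, str]:
--     n = str(name).strip()
--     if n.endswith(".0") and n.replace(".", "", 1).isdigit():
--         n = n.split(".", 1)[0]
--     n2 = n
--     if n2.lower().startswith("chr"):
--         n2 = n2[3:]
--     n2 = n2.lstrip("0")
--     return n, n2
--
-- def match_contig(seqs: Dict[str, str], chrom: str) -> Optional[str]:
--     if chrom in seqs: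
--         return chrom
--     orig, stripped = sanitize_contig_name(chrom)
--     for k in seqs.keys():
--         if k.lower() == orig.lower():
--             return k
--     for k in seqs.keys():
--         if k.lower() in (f"chr{stripped}".lower(), stripped.lower()):
--             return k
--     base = orig.split()[0].split(".")[0]
--     for k in seqs.keys():
--         if k.split()[0].split(".")[0].lower() == base.lower():
--             return k
--     return None
-- ===== SOURCE B (Python) =====
-- from typing import Dict, Optional, Tuple
--
-- def sanitize_contig_name(name: str) -> Tuple[str, str]:
--     n = str(name).strip()
--     if n.endswith(".0") and n.replace(".", "", 1).isdigit():
--         n = n.split(".", 1)[0]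
--     n2 = n
--     if n2.lower().startswith("chr"):
--         n2 = n2[3:]
--     n2 = n2.lstrip("0")
--     return n, n2
--
-- def match_contig(seqs: Dict[str, str], chrom: str) -> Optional[str]:
--     orig, stripped = sanitize_contig_name(chrom)
--     lo = orig.lower()
--     t2 = (("chr" + stripped).lower(), stripped.lower())
--     best_tier, best_key = 3, None
--     for k in seqs:
--         tier = 0 if k == chrom else 1 if k.lower() == lo else 2 if k.lower() in t2 else 3
--         if tier < best_tier:
--             best_tier, best_key = tier, k
--     if best_key is not None:
--         return best_key
--     base = orig.split()[0].split(".")[0].lower()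
--     for k in seqs:
--         if k.split()[0].split(".")[0].lower() == base:
--             return k
--     return None
-- ===== Notes on version B (the rewrite author's own statement) =====
-- stated objective: faster
-- what changed: A makes the exact-membership check plus two further sequential passes over the keys, rebuilding and lowering the chrom-derived comparison targets for every key; B hoists those targets once and classifies every key into a tier (0 exact, 1 case-insensitive, 2 chr/stripped) in a single pass keeping the first key of the smallest tier, running the base-token pass only when that pass found nothing so it raises exactly where A raises.
import Mathlib
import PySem

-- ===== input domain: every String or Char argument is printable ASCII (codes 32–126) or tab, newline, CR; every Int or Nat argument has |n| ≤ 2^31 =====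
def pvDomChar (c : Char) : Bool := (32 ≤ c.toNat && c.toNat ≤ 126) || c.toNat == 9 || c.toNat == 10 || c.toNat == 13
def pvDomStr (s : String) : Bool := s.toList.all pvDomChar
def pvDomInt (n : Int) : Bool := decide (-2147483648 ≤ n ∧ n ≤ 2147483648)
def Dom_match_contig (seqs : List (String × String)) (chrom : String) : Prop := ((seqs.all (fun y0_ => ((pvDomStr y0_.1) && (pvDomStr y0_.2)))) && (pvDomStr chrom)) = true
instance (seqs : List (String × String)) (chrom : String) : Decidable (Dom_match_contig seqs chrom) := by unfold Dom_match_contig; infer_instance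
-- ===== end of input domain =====

-- B replaces A's exact-membership check and two further sequential passes by one pass that keeps the
-- first key of the smallest match tier (0 exact, 1 case-insensitive, 2 chr/stripped form), with the
-- lowered targets computed once; the base-token pass runs only when that pass found nothing, so B
-- raises exactly where A raises. Objective: faster (a timing run measured B faster; A re-lowers the
-- chrom-derived targets per key, B computes them once).

-- ===== PORT A =====
-- shared helper: dict keys in insertion order = first occurrences of the pair list's keys
def pvKeys (seqs : List (String × String)) : List String := PySem.List.dedup (seqs.map Prod.fst)

-- shared helper: sanitize_contig_name (identical helper in Source A and Source B), on List Char.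
-- n.replace(".", "", 1) for a 1-char pattern and empty replacement is List.erase (first occurrence);
-- n2[3:] with a nonnegative literal index is List.drop 3; n2.lstrip("0") is dropWhile (== '0') — all exact.
def pvSanitize (name : String) : List Char × List Char :=
  let n0 := PySem.Chars.strip name.toList
  let n := if PySem.Chars.endswith n0 ['.', '0'] && PySem.Chars.strIsdigit (n0.erase '.') then
      ((PySem.Chars.splitMax? n0 ['.'] 1).getD []).headD []   -- n.split(".", 1)[0]; result of split is never empty
    else n0
  let n2 := if PySem.Chars.startswith (PySem.Chars.lower n) ['c', 'h', 'r'] then n.drop 3 else n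
  (n, n2.dropWhile (fun c => c == '0'))

-- s.split()[0].split(".")[0].lower() : none = IndexError of the first [0] (s has no non-whitespace
-- character); the second [0] never raises since split(".") is never empty.
def pvTokL? (cs : List Char) : Option (List Char) :=
  match PySem.List.pyGet? (PySem.Chars.split₀ cs) 0 with
  | none => none
  | some w => some (PySem.Chars.lower ((PySem.Chars.splitOn w ['.']).headD []))

-- the base-token loop (A's third loop; Source B's second loop is the same code);
-- none = the IndexError raised on a key without non-whitespace characters (excluded by Pre_)
def pvLoopA (baseL : List Char) : List String → Option String
  | [] => none
  | k :: rest =>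
    match pvTokL? k.toList with
    | none => none
    | some t => if t == baseL then some k else pvLoopA baseL rest

def match_contig (seqs : List (String × String)) (chrom : String) : Option String :=
  let ks := pvKeys seqs
  if ks.contains chrom then some chrom
  else
    let p := pvSanitize chrom
    match ks.find? (fun k => PySem.Chars.lower k.toList == PySem.Chars.lower p.1) with
    | some k => some k
    | none =>
      match ks.find? (fun k => PySem.Chars.lower k.toList == PySem.Chars.lower ('c' :: 'h' :: 'r' :: p.2)
                            || PySem.Chars.lower k.toList == PySem.Chars.lower p.2) with
      | some k => some k
      | none =>
        match pvTokL? p.1 with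
        | none => none      -- IndexError: orig has no non-whitespace character (excluded by Pre_)
        | some baseL => pvLoopA baseL ks

-- ===== PORT B =====
-- the tier of one key: 0 exact, 1 case-insensitive, 2 chr/stripped form, 3 no match (total)
def pvTier012 (chrom : String) (lo ca sa : List Char) (k : String) : Nat :=
  if k == chrom then 0
  else if PySem.Chars.lower k.toList == lo then 1
  else if PySem.Chars.lower k.toList == ca || PySem.Chars.lower k.toList == sa then 2
  else 3

-- the single pass keeping (best_tier, best_key), updating on a strictly smaller tier
def pvLoopB (tier : String → Nat) : List String → Nat → Option String → Option String
  | [], _, bk => bk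
  | k :: rest, bt, bk =>
    if tier k < bt then pvLoopB tier rest (tier k) (some k) else pvLoopB tier rest bt bk

def match_contig_alt (seqs : List (String × String)) (chrom : String) : Option String :=
  let ks := pvKeys seqs
  let p := pvSanitize chrom
  let lo := PySem.Chars.lower p.1
  let ca := PySem.Chars.lower ('c' :: 'h' :: 'r' :: p.2)
  let sa := PySem.Chars.lower p.2
  match pvLoopB (pvTier012 chrom lo ca sa) ks 3 none with
  | some k => some k
  | none =>
    match pvTokL? p.1 with
    | none => none          -- IndexError computing base (orig has no non-whitespace character; excluded by Pre_)
    | some baseL => pvLoopA baseL ks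

-- ===== PRECONDITION & SPEC =====
-- does a key match by identity, case-insensitive name or chr/stripped form (tiers 0–2)?
def pvHit (chrom : String) (k : String) : Bool :=
  pvTier012 chrom (PySem.Chars.lower (pvSanitize chrom).1)
    (PySem.Chars.lower ('c' :: 'h' :: 'r' :: (pvSanitize chrom).2))
    (PySem.Chars.lower (pvSanitize chrom).2) k < 3

-- Pre_ excludes exactly the inputs on which A (and B identically) raises IndexError: no key matches
-- at tiers 0–2 and either the sanitized chrom is whitespace-only, or some whitespace-only key is not
-- preceded by a base-token-matching key (so the third loop's split()[0] is reached and raises).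
def Pre_match_contig (seqs : List (String × String)) (chrom : String) : Prop :=
  (∃ k ∈ pvKeys seqs, pvHit chrom k = true) ∨
  (PySem.Chars.split₀ (pvSanitize chrom).1 ≠ [] ∧
   ∀ i, (h : i < (pvKeys seqs).length) → PySem.Chars.split₀ ((pvKeys seqs)[i]).toList = [] →
     ∃ k ∈ (pvKeys seqs).take i, pvTokL? k.toList = pvTokL? (pvSanitize chrom).1)
instance (seqs : List (String × String)) (chrom : String) : Decidable (Pre_match_contig seqs chrom) := by
  unfold Pre_match_contig; infer_instance
def pvWitness_match_contig : (List (String × String)) × String := ([("chr1", "ACGT")], "1")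
def Spec_match_contig (seqs : List (String × String)) (chrom : String) (out : Option String) : Prop := out = match_contig_alt seqs chrom
instance (seqs : List (String × String)) (chrom : String) (out : Option String) : Decidable (Spec_match_contig seqs chrom out) := by unfold Spec_match_contig; infer_instance

-- ===== CLAIM (what is proved, stated in full; the proofs are below) =====
def Claim_equal_match_contig : Prop := ∀ (seqs : List (String × String)) (chrom : String), Dom_match_contig seqs chrom → Pre_match_contig seqs chrom → Spec_match_contig seqs chrom (match_contig seqs chrom)

-- ===== LEMMAS AND PROOFS =====

-- running minimum of the tiers
def pvMin (f : String → Nat) (ks : List String) (bt : Nat) : Nat :=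
  ks.foldl (fun a k => min a (f k)) bt

lemma pvFind?_congr {α : Type} (p q : α → Bool) : ∀ l : List α, (∀ x ∈ l, p x = q x) → l.find? p = l.find? q := by
  intro l h
  induction l with
  | nil => rfl
  | cons x t ih =>
    simp only [List.find?_cons]
    rw [h x (by simp)]
    cases q x
    · exact ih (fun y hy => h y (by simp [hy]))
    · rfl

lemma pvMin_cons (f : String → Nat) (k : String) (ks : List String) (bt : Nat) :
    pvMin f (k :: ks) bt = pvMin f ks (min bt (f k)) := rfl

lemma pvMin_le (f : String → Nat) : ∀ (ks : List String) (bt : Nat), pvMin f ks bt ≤ bt := by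
  intro ks
  induction ks with
  | nil => intro bt; exact le_rfl
  | cons k t ih =>
    intro bt
    calc pvMin f (k :: t) bt = pvMin f t (min bt (f k)) := rfl
      _ ≤ min bt (f k) := ih _
      _ ≤ bt := min_le_left _ _

lemma pvMin_le_mem (f : String → Nat) : ∀ (ks : List String) (bt : Nat),
    ∀ k ∈ ks, pvMin f ks bt ≤ f k := by
  intro ks
  induction ks with
  | nil => intro bt k hk; cases hk
  | cons x t ih =>
    intro bt k hk
    rcases List.mem_cons.mp hk with rfl | hk
    · calc pvMin f (k :: t) bt = pvMin f t (min bt (f k)) := rfl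
        _ ≤ min bt (f k) := pvMin_le _ _ _
        _ ≤ f k := min_le_right _ _
    · exact ih _ k hk

lemma pvMin_attained (f : String → Nat) : ∀ (ks : List String) (bt : Nat),
    pvMin f ks bt = bt ∨ ∃ k ∈ ks, f k = pvMin f ks bt := by
  intro ks
  induction ks with
  | nil => intro bt; exact Or.inl rfl
  | cons x t ih =>
    intro bt
    rw [pvMin_cons]
    rcases ih (min bt (f x)) with h | ⟨k, hk, hv⟩
    · rw [h]
      rcases min_choice bt (f x) with h' | h'
      · exact Or.inl h'
      · exact Or.inr ⟨x, by simp, h'.symm⟩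
    · exact Or.inr ⟨k, by simp [hk], hv⟩

lemma pvLoopB_eq_scan (f : String → Nat) :
    ∀ (ks : List String) (bt : Nat) (bk : Option String),
    pvLoopB f ks bt bk =
      if pvMin f ks bt < bt then ks.find? (fun k => f k == pvMin f ks bt) else bk := by
  intro ks
  induction ks with
  | nil => intro bt bk; simp [pvLoopB, pvMin]
  | cons k rest ih =>
    intro bt bk
    rw [pvMin_cons]
    simp only [pvLoopB]
    by_cases hlt : f k < bt
    · have hmin : min bt (f k) = f k := min_eq_right (le_of_lt hlt)
      rw [hmin, if_pos hlt, ih (f k) (some k)]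
      have hM : pvMin f rest (f k) ≤ f k := pvMin_le _ _ _
      by_cases hM' : pvMin f rest (f k) < f k
      · rw [if_pos hM', if_pos (lt_trans hM' hlt), List.find?_cons,
          show (f k == pvMin f rest (f k)) = false by simp; omega]
      · have hMe : pvMin f rest (f k) = f k := le_antisymm hM (not_lt.mp hM')
        rw [if_neg hM', if_pos (by omega), List.find?_cons,
          show (f k == pvMin f rest (f k)) = true by simp [hMe]]
    · have hmin : min bt (f k) = bt := min_eq_left (not_lt.mp hlt)
      rw [hmin, if_neg hlt, ih bt bk]
      by_cases hM' : pvMin f rest bt < bt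
      · rw [if_pos hM', if_pos hM', List.find?_cons,
          show (f k == pvMin f rest bt) = false by simp; omega]
      · rw [if_neg hM', if_neg hM']

-- ===== VERDICT (by name: the statement is the Claim_ definition above) =====
set_option maxHeartbeats 1000000 in
theorem match_contig_spec : Claim_equal_match_contig := by
  intro seqs chrom _hdom _hpre
  unfold Spec_match_contig
  set ks := pvKeys seqs with hks
  set p := pvSanitize chrom with hp
  set lo := PySem.Chars.lower p.1 with hlo
  set ca := PySem.Chars.lower ('c' :: 'h' :: 'r' :: p.2) with hca
  set sa := PySem.Chars.lower p.2 with hsa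
  set f := pvTier012 chrom lo ca sa with hf
  have hB : match_contig_alt seqs chrom =
      (match (if pvMin f ks 3 < 3 then ks.find? (fun k => f k == pvMin f ks 3) else none) with
       | some k => some k
       | none =>
         match pvTokL? p.1 with
         | none => none
         | some baseL => pvLoopA baseL ks) := by
    show (match pvLoopB f ks 3 none with
      | some k => some k
      | none => match pvTokL? p.1 with
        | none => none
        | some baseL => pvLoopA baseL ks) = _
    rw [pvLoopB_eq_scan f ks 3 none]
  by_cases hc : chrom ∈ ks
  · -- chrom is a key: A returns chrom; B's minimal tier is 0 and the first tier-0 key is chrom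
    have htv0 : f chrom = 0 := by simp [hf, pvTier012]
    have hM0 : pvMin f ks 3 = 0 := Nat.le_zero.mp (htv0 ▸ pvMin_le_mem f ks 3 chrom hc)
    have hA : match_contig seqs chrom = some chrom := by
      show (if ks.contains chrom then some chrom else _) = some chrom
      rw [if_pos (List.elem_eq_true_of_mem hc)]
    rw [hA, hB, hM0, if_pos (by omega)]
    cases hfind : ks.find? (fun k => f k == 0) with
    | none => exact absurd (List.find?_eq_none.mp hfind chrom hc) (by simp [htv0])
    | some k' =>
      have hp' : (f k' == 0) = true := List.find?_some (p := fun (k : String) => f k == 0) hfind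
      have h0 : f k' = 0 := by simpa using hp'
      have hk'c : k' = chrom := by
        simp only [hf, pvTier012] at h0
        by_cases g0 : (k' == chrom) = true
        · exact eq_of_beq g0
        · rw [if_neg g0] at h0
          split_ifs at h0
      rw [hk'c]
  · -- chrom is not a key: no key has tier 0
    have hnc : ks.contains chrom = false := by
      rcases Bool.eq_false_or_eq_true (ks.contains chrom) with h | h
      · exact absurd (by simpa using h) hc
      · exact h
    have hne : ∀ k ∈ ks, (k == chrom) = false := by
      intro k hk
      rcases Bool.eq_false_or_eq_true (k == chrom) with h | h
      · exact absurd (by rwa [(beq_iff_eq).mp h] at hk) hc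
      · exact h
    have htv_ne0 : ∀ k ∈ ks, f k ≠ 0 := by
      intro k hk
      simp only [hf, pvTier012, hne k hk]
      split_ifs <;> simp_all
    have hA : match_contig seqs chrom =
        (match ks.find? (fun k => PySem.Chars.lower k.toList == lo) with
         | some k => some k
         | none =>
           match ks.find? (fun k => PySem.Chars.lower k.toList == ca || PySem.Chars.lower k.toList == sa) with
           | some k => some k
           | none =>
             match pvTokL? p.1 with
             | none => none
             | some baseL => pvLoopA baseL ks) := by
      show (if ks.contains chrom then some chrom else _) = _
      rw [hnc]
      rfl
    rw [hA, hB]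
    cases hf1 : ks.find? (fun k => PySem.Chars.lower k.toList == lo) with
    | some k1 =>
      have hm1 := List.mem_of_find?_eq_some hf1
      have hq1 : (PySem.Chars.lower k1.toList == lo) = true :=
        List.find?_some (p := fun (k : String) => PySem.Chars.lower k.toList == lo) hf1
      have htv1 : f k1 = 1 := by
        simp only [hf, pvTier012, hne k1 hm1, hq1]; rfl
      have hM : pvMin f ks 3 = 1 := by
        have hle := htv1 ▸ pvMin_le_mem f ks 3 k1 hm1
        rcases pvMin_attained f ks 3 with h | ⟨k', hk', hv'⟩
        · omega
        · have := htv_ne0 k' hk'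
          omega
      rw [hM, if_pos (by omega)]
      have hcong : List.find? (fun k => f k == 1) ks
          = List.find? (fun k => PySem.Chars.lower k.toList == lo) ks := by
        apply pvFind?_congr
        intro k hk
        simp only [hf, pvTier012, hne k hk]
        split_ifs <;> simp_all
      rw [hcong, hf1]
    | none =>
      have hnq1 : ∀ k ∈ ks, (PySem.Chars.lower k.toList == lo) = false :=
        fun k hk => by simpa using List.find?_eq_none.mp hf1 k hk
      have htv_ne1 : ∀ k ∈ ks, f k ≠ 1 := by
        intro k hk
        simp only [hf, pvTier012, hne k hk, hnq1 k hk]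
        split_ifs <;> simp_all
      cases hf2 : ks.find? (fun k => PySem.Chars.lower k.toList == ca || PySem.Chars.lower k.toList == sa) with
      | some k2 =>
        have hm2 := List.mem_of_find?_eq_some hf2
        have hq2 : (PySem.Chars.lower k2.toList == ca || PySem.Chars.lower k2.toList == sa) = true :=
          List.find?_some (p := fun (k : String) => PySem.Chars.lower k.toList == ca || PySem.Chars.lower k.toList == sa) hf2
        have htv2 : f k2 = 2 := by
          simp only [hf, pvTier012, hne k2 hm2, hnq1 k2 hm2, hq2]; rfl
        have hM : pvMin f ks 3 = 2 := by
          have hle := htv2 ▸ pvMin_le_mem f ks 3 k2 hm2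
          rcases pvMin_attained f ks 3 with h | ⟨k', hk', hv'⟩
          · omega
          · have := htv_ne0 k' hk'
            have := htv_ne1 k' hk'
            omega
        rw [hM, if_pos (by omega)]
        have hcong : List.find? (fun k => f k == 2) ks
            = List.find? (fun k => PySem.Chars.lower k.toList == ca || PySem.Chars.lower k.toList == sa) ks := by
          apply pvFind?_congr
          intro k hk
          simp only [hf, pvTier012, hne k hk, hnq1 k hk]
          split_ifs <;> simp_all
        rw [hcong, hf2]
      | none =>
        have hnq2 : ∀ k ∈ ks, (PySem.Chars.lower k.toList == ca || PySem.Chars.lower k.toList == sa) = false :=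
          fun k hk => by simpa using List.find?_eq_none.mp hf2 k hk
        have htv3 : ∀ k ∈ ks, f k = 3 := by
          intro k hk
          simp only [hf, pvTier012, hne k hk, hnq1 k hk, hnq2 k hk]
          simp
        have hM : pvMin f ks 3 = 3 := by
          rcases pvMin_attained f ks 3 with h | ⟨k', hk', hv'⟩
          · exact h
          · rw [← hv', htv3 k' hk']
        rw [hM, if_neg (by omega)]
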